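-- pv_equiv track=rewrite | github.com/sumohammed0/CSP-Solver | main.py | break_tie
-- ===== SOURCE A (Python) =====
-- def break_tie(variable_tie_list, domain_dict, assigned_dict,
--               constraint_list):  # should return variable to choose unless its a tie
--     # pick variable based on degree heuristic ->
--     # select the variable that is involved in the largest number of constraints on other unassigned variables
--     var_deg = {}  # track degree for each variable
--     for var_key in variable_tie_list:
--         degree = check_degree(var_key, domain_dict, assigned_dict, constraint_list)
--         var_deg[var_key] = degree
--
--     max_domain = max(var_deg.values())  # get the max degree
--     tie_variables_deg = []
--     # find ties btw variable degrees
--     for var_key in var_deg: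
--         if var_deg[var_key] == max_domain:
--             tie_variables_deg.append(var_key)
--
--     if len(tie_variables_deg) == 1:  # if no ties, then return the var
--         return tie_variables_deg[0]
--     elif len(
--             tie_variables_deg) > 1:  # if tie, then return the vaiable that comes first alphabetically by comparing ascii
--         return min(tie_variables_deg)
--
-- def check_degree(var, domain_dict, assigned_dict, constraint_list):
--     # for the variable check how many constraints it is involved in and increment degree if the other variable in the constraint is unassigned
--     degree = 0
--     for constraint in constraint_list:
--         var1 = constraint[0]
--         operator = constraint[1]
--         var2 = constraint[2]
--
--         if var == var1 and var2 not in assigned_dict: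
--             degree += 1
--         elif var == var2 and var1 not in assigned_dict:
--             degree += 1
--
--     return degree
-- ===== SOURCE B (Python) =====
-- def break_tie(variable_tie_list, domain_dict, assigned_dict, constraint_list):
--     # Loop inversion: one pass over the constraints accumulating degrees into a
--     # counter keyed by candidate variable, then one argmax pass with alphabetical
--     # tie-break -- instead of re-scanning the whole constraint list per variable.
--     counts = {v: 0 for v in variable_tie_list}
--     for v1, _, v2 in constraint_list:
--         if v1 in counts and v2 not in assigned_dict:
--             counts[v1] += 1
--         if v1 != v2 and v2 in counts and v1 not in assigned_dict:
--             counts[v2] += 1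
--     best = None
--     for v in variable_tie_list:
--         if best is None or counts[v] > counts[best] \
--                 or (counts[v] == counts[best] and v < best):
--             best = v
--     return best
-- ===== Notes on version B (the rewrite author's own statement) =====
-- stated objective: faster
-- what changed: Loop inversion: instead of calling check_degree per variable (rescanning the whole constraint list each time), B makes a single pass over the constraints accumulating per-variable degrees in a counter dict, then a single argmax pass with alphabetical tie-break replaces the max scan + tie-list + min.
import Mathlib
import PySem

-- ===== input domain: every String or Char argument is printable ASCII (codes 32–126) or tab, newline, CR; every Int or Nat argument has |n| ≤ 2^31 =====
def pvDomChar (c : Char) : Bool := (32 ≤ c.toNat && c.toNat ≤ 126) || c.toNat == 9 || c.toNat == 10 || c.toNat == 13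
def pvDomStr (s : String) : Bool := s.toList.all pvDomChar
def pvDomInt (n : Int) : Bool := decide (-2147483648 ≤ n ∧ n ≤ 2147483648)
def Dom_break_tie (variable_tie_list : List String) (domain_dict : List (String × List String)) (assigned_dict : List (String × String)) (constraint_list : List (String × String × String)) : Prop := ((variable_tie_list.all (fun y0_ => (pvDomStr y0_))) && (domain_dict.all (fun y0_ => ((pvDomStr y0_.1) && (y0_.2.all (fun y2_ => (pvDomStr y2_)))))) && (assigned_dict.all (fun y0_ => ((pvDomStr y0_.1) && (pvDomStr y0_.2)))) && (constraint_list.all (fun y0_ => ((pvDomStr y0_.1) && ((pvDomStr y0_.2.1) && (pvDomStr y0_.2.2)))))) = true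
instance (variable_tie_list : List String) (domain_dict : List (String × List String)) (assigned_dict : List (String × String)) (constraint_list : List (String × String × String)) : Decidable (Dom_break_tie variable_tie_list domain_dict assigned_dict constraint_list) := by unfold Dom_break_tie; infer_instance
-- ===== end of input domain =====

-- B inverts A's loops: one pass over the constraints accumulating degrees into a counter
-- keyed by candidate variable, then one argmax pass with alphabetical tie-break,
-- instead of A's per-variable rescans of the constraint list plus max/tie-list/min.

-- ===== PORT A =====
-- helper check_degree of A: fold over the constraints in order, branches in A's order
def pvCheckDegree (var : String) (domain_dict : List (String × List String)) (assigned_dict : List (String × String)) (constraint_list : List (String × String × String)) : Int :=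
  constraint_list.foldl (fun degree c =>
    -- var1 = c.1, operator = c.2.1 (unused by the branches), var2 = c.2.2
    if var == c.1 && !(assigned_dict.any (fun p => p.1 == c.2.2)) then degree + 1
    else if var == c.2.2 && !(assigned_dict.any (fun p => p.1 == c.1)) then degree + 1
    else degree) 0

def break_tie (variable_tie_list : List String) (domain_dict : List (String × List String)) (assigned_dict : List (String × String)) (constraint_list : List (String × String × String)) : String :=
  let var_deg : PySem.Dict String Int :=
    variable_tie_list.foldl (fun d var_key => d.insert var_key (pvCheckDegree var_key domain_dict assigned_dict constraint_list)) PySem.Dict.empty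
  -- max(var_deg.values()) raises ValueError on an empty dict: excluded by Pre_
  let max_domain : Int := (PySem.List.max? var_deg.values (fun x => x)).getD 0
  let tie_variables_deg : List String :=
    var_deg.keys.foldl (fun acc var_key => if var_deg.getD var_key 0 == max_domain then acc ++ [var_key] else acc) []
  if tie_variables_deg.length == 1 then PySem.List.pyGetD tie_variables_deg 0 ""
  else if 1 < tie_variables_deg.length then (PySem.List.min? tie_variables_deg (fun x => x)).getD ""
  else ""  -- Python falls through and returns None here; unreachable when variable_tie_list ≠ []

-- ===== PORT B =====
-- body of B's constraint loop: bump the count of each endpoint of c that is a candidate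
-- with the opposite endpoint unassigned ('counts[v] += 1' is modify with the key present)
def pvCountStep (assigned_dict : List (String × String)) (d : PySem.Dict String Int) (c : String × String × String) : PySem.Dict String Int :=
  let d1 := if d.contains c.1 && !(assigned_dict.any (fun p => p.1 == c.2.2)) then d.modify c.1 0 (· + 1) else d
  if c.1 != c.2.2 && (d1.contains c.2.2 && !(assigned_dict.any (fun p => p.1 == c.1))) then d1.modify c.2.2 0 (· + 1) else d1

-- body of B's selection loop: keep the better of best-so-far and v
def pvSelStep (counts : PySem.Dict String Int) (best : Option String) (v : String) : Option String :=
  match best with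
  | none => some v
  | some b =>
      if decide (counts.getD b 0 < counts.getD v 0) || (counts.getD v 0 == counts.getD b 0 && decide (v < b)) then some v
      else some b

def break_tie_alt (variable_tie_list : List String) (domain_dict : List (String × List String)) (assigned_dict : List (String × String)) (constraint_list : List (String × String × String)) : String :=
  let counts0 : PySem.Dict String Int := variable_tie_list.foldl (fun d v => d.insert v 0) PySem.Dict.empty
  let counts := constraint_list.foldl (pvCountStep assigned_dict) counts0
  -- Python's B returns None on an empty variable_tie_list: excluded by Pre_
  (variable_tie_list.foldl (pvSelStep counts) none).getD ""

-- ===== PRECONDITION & SPEC =====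
-- Pre_ excludes only the empty variable_tie_list, on which A raises ValueError
-- (max() of an empty sequence); B returns None (not a string) there.
def Pre_break_tie (variable_tie_list : List String) (domain_dict : List (String × List String)) (assigned_dict : List (String × String)) (constraint_list : List (String × String × String)) : Prop :=
  variable_tie_list ≠ []
instance (variable_tie_list : List String) (domain_dict : List (String × List String)) (assigned_dict : List (String × String)) (constraint_list : List (String × String × String)) : Decidable (Pre_break_tie variable_tie_list domain_dict assigned_dict constraint_list) := by unfold Pre_break_tie; infer_instance

def pvWitness_break_tie : List String × (List (String × List String)) × (List (String × String)) × (List (String × String × String)) :=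
  (["b", "a"], [("a", ["1"]), ("b", ["1"])], [("c", "1")], [("a", "!=", "b"), ("a", "!=", "c")])

def Spec_break_tie (variable_tie_list : List String) (domain_dict : List (String × List String)) (assigned_dict : List (String × String)) (constraint_list : List (String × String × String)) (out : String) : Prop := out = break_tie_alt variable_tie_list domain_dict assigned_dict constraint_list
instance (variable_tie_list : List String) (domain_dict : List (String × List String)) (assigned_dict : List (String × String)) (constraint_list : List (String × String × String)) (out : String) : Decidable (Spec_break_tie variable_tie_list domain_dict assigned_dict constraint_list out) := by unfold Spec_break_tie; infer_instance

-- ===== CLAIM (what is proved, stated in full; the proofs are below) =====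
def Claim_equal_break_tie : Prop := ∀ (variable_tie_list : List String) (domain_dict : List (String × List String)) (assigned_dict : List (String × String)) (constraint_list : List (String × String × String)), Dom_break_tie variable_tie_list domain_dict assigned_dict constraint_list → Pre_break_tie variable_tie_list domain_dict assigned_dict constraint_list → Spec_break_tie variable_tie_list domain_dict assigned_dict constraint_list (break_tie variable_tie_list domain_dict assigned_dict constraint_list)

-- ===== LEMMAS AND PROOFS =====

-- "r beats-or-equals y": strictly higher degree, or equal degree and alphabetically no later
def pvGe2 (g : String → Int) (r y : String) : Prop :=
  g y < g r ∨ (g y = g r ∧ r ≤ y)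

theorem pvGe2_refl (g : String → Int) (x : String) : pvGe2 g x x :=
  Or.inr ⟨rfl, le_refl _⟩

theorem pvGe2_trans (g : String → Int) {x y z : String}
    (h1 : pvGe2 g x y) (h2 : pvGe2 g y z) : pvGe2 g x z := by
  rcases h1 with h1 | ⟨e1, l1⟩ <;> rcases h2 with h2 | ⟨e2, l2⟩
  · exact Or.inl (h2.trans h1)
  · exact Or.inl (e2 ▸ h1)
  · exact Or.inl (e1 ▸ h2)
  · exact Or.inr ⟨e2.trans e1, l1.trans l2⟩

-- the element both programs return: the alphabetically-first maximal-degree candidate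
def pvBest (g : String → Int) (xs : List String) (r : String) : Prop :=
  r ∈ xs ∧ ∀ y ∈ xs, pvGe2 g r y

theorem pvBest_unique (g : String → Int) (xs : List String) {r1 r2 : String}
    (h1 : pvBest g xs r1) (h2 : pvBest g xs r2) : r1 = r2 := by
  rcases h1.2 r2 h2.1 with hlt | ⟨he, hle⟩
  · rcases h2.2 r1 h1.1 with hlt' | ⟨he', _⟩
    · exact absurd (hlt.trans hlt') (lt_irrefl _)
    · exact absurd hlt (he' ▸ lt_irrefl _)
  · rcases h2.2 r1 h1.1 with hlt' | ⟨_, hle'⟩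
    · exact absurd hlt' (he ▸ lt_irrefl _)
    · exact le_antisymm hle hle'

-- a dict built by inserting a value that depends only on the key
theorem pv_get?_foldl_insert_fun (f : String → Int) (xs : List String) (d : PySem.Dict String Int) (k : String) :
    (xs.foldl (fun d v => d.insert v (f v)) d).get? k = if k ∈ xs then some (f k) else d.get? k := by
  induction xs generalizing d with
  | nil => simp
  | cons h t ih =>
    simp only [List.foldl_cons, ih, List.mem_cons]
    by_cases hkt : k ∈ t
    · simp [hkt]
    · by_cases hkh : k = h
      · subst hkh; simp [hkt, PySem.Dict.get?_insert_self]
      · simp [hkt, hkh, PySem.Dict.get?_insert_of_ne _ _ hkh]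

theorem pv_contains_foldl_insert_fun (f : String → Int) (xs : List String) (k : String) :
    ((xs.foldl (fun d v => d.insert v (f v)) PySem.Dict.empty).contains k) = decide (k ∈ xs) := by
  rw [PySem.Dict.contains_eq_isSome_get?, pv_get?_foldl_insert_fun]
  by_cases hk : k ∈ xs <;> simp [hk]

theorem pv_getD_foldl_insert_fun (f : String → Int) (xs : List String) (k : String) (hk : k ∈ xs) :
    ((xs.foldl (fun d v => d.insert v (f v)) PySem.Dict.empty).getD k 0) = f k := by
  simp [PySem.Dict.getD, pv_get?_foldl_insert_fun, hk]

-- modifying a key that is already present does not change which keys are present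
theorem pv_contains_modify_mem (d : PySem.Dict String Int) (key k : String)
    (hkey : d.contains key = true) : (d.modify key 0 (· + 1)).contains k = d.contains k := by
  rw [PySem.Dict.contains_modify]
  by_cases hk : k = key
  · subst hk; simp [hkey]
  · simp [hk]

-- one step of B's constraint loop never changes which keys are present
theorem pv_count_step_contains (ad : List (String × String)) (d : PySem.Dict String Int)
    (c : String × String × String) (k : String) :
    (pvCountStep ad d c).contains k = d.contains k := by
  unfold pvCountStep
  cases hb1 : (d.contains c.1 && !(ad.any (fun p => p.1 == c.2.2))) with
  | true =>
    have hc1 : d.contains c.1 = true := by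
      have := hb1; simp [Bool.and_eq_true] at this; exact this.1
    simp only [if_true]
    cases hb2 : (c.1 != c.2.2 && ((d.modify c.1 0 (· + 1)).contains c.2.2 && !(ad.any (fun p => p.1 == c.1)))) with
    | true =>
      have hc2 : (d.modify c.1 0 (· + 1)).contains c.2.2 = true := by
        have := hb2; simp [Bool.and_eq_true] at this; exact this.2.1
      simp only [if_true]
      rw [pv_contains_modify_mem _ _ _ hc2, pv_contains_modify_mem _ _ _ hc1]
    | false =>
      simp only [Bool.false_eq_true, if_false]
      exact pv_contains_modify_mem _ _ _ hc1
  | false =>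
    simp only [Bool.false_eq_true, if_false]
    cases hb2 : (c.1 != c.2.2 && (d.contains c.2.2 && !(ad.any (fun p => p.1 == c.1)))) with
    | true =>
      have hc2 : d.contains c.2.2 = true := by
        have := hb2; simp [Bool.and_eq_true] at this; exact this.2.1
      simp only [if_true]
      exact pv_contains_modify_mem _ _ _ hc2
    | false =>
      simp only [Bool.false_eq_true, if_false]

-- one constraint's effect on B's counter, seen at candidate v, is A's check_degree branch for v
set_option maxHeartbeats 1000000 in
theorem pv_count_step_getD (xs : List String) (ad : List (String × String))
    (d : PySem.Dict String Int) (h : ∀ k, d.contains k = decide (k ∈ xs))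
    (c : String × String × String) (v : String) (hv : v ∈ xs) :
    (pvCountStep ad d c).getD v 0 =
      (if v == c.1 && !(ad.any (fun p => p.1 == c.2.2)) then d.getD v 0 + 1
       else if v == c.2.2 && !(ad.any (fun p => p.1 == c.1)) then d.getD v 0 + 1
       else d.getD v 0) := by
  unfold pvCountStep
  generalize hu2 : (!(ad.any (fun p => p.1 == c.2.2))) = u2
  generalize hu1 : (!(ad.any (fun p => p.1 == c.1))) = u1
  by_cases hv1 : v = c.1 <;> by_cases hv2 : v = c.2.2 <;>
    cases hc1 : d.contains c.1 <;> cases hc22 : d.contains c.2.2 <;>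
    cases u1 <;> cases u2 <;> by_cases h12 : c.1 = c.2.2 <;>
    (try simp_all [PySem.Dict.getD_modify, PySem.Dict.contains_modify]) <;>
    (rw [if_neg (fun hh => h12 hh.symm)]; simp_all [PySem.Dict.getD_modify])

-- B's counter loop computes A's check_degree fold for every candidate
theorem pv_count_foldl (xs : List String) (ad : List (String × String))
    (cs : List (String × String × String)) (d : PySem.Dict String Int)
    (h : ∀ k, d.contains k = decide (k ∈ xs)) (v : String) (hv : v ∈ xs) :
    (cs.foldl (pvCountStep ad) d).getD v 0 =
      cs.foldl (fun degree c =>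
        if v == c.1 && !(ad.any (fun p => p.1 == c.2.2)) then degree + 1
        else if v == c.2.2 && !(ad.any (fun p => p.1 == c.1)) then degree + 1
        else degree) (d.getD v 0) := by
  induction cs generalizing d with
  | nil => rfl
  | cons c t ih =>
    have hcont : ∀ k, (pvCountStep ad d c).contains k = decide (k ∈ xs) := fun k => by
      rw [pv_count_step_contains, h]
    simp only [List.foldl_cons]
    rw [ih (pvCountStep ad d c) hcont, pv_count_step_getD xs ad d h c v hv]

theorem pv_counts_eq_checkDegree (xs : List String) (dd : List (String × List String))
    (ad : List (String × String)) (cs : List (String × String × String)) (v : String) (hv : v ∈ xs) :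
    ((cs.foldl (pvCountStep ad) (xs.foldl (fun d v => d.insert v 0) PySem.Dict.empty)).getD v 0)
      = pvCheckDegree v dd ad cs := by
  have h0 : ∀ k, ((xs.foldl (fun d v => d.insert v (0:Int)) PySem.Dict.empty).contains k) = decide (k ∈ xs) :=
    pv_contains_foldl_insert_fun (fun _ => 0) xs
  rw [pv_count_foldl xs ad cs _ h0 v hv,
      pv_getD_foldl_insert_fun (fun _ => 0) xs v hv]
  rfl

-- invariant of B's selection fold once the accumulator is `some m`
theorem pv_sel_foldl (counts : PySem.Dict String Int) (t : List String) (m : String) :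
    ∃ r, t.foldl (pvSelStep counts) (some m) = some r ∧
      (r = m ∨ r ∈ t) ∧ pvGe2 (fun v => counts.getD v 0) r m ∧
      ∀ y ∈ t, pvGe2 (fun v => counts.getD v 0) r y := by
  induction t generalizing m with
  | nil => exact ⟨m, rfl, Or.inl rfl, pvGe2_refl _ m, fun y hy => absurd hy (List.not_mem_nil)⟩
  | cons h tt ih =>
    cases hb : (decide (counts.getD m 0 < counts.getD h 0) ||
        (counts.getD h 0 == counts.getD m 0 && decide (h < m))) with
    | true =>
      obtain ⟨r, hr, hmem, hrh, hall⟩ := ih h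
      have hhm : pvGe2 (fun v => counts.getD v 0) h m := by
        simp only [Bool.or_eq_true, Bool.and_eq_true, decide_eq_true_eq, beq_iff_eq] at hb
        rcases hb with hb | ⟨hb1, hb2⟩
        · exact Or.inl hb
        · exact Or.inr ⟨hb1.symm, le_of_lt hb2⟩
      refine ⟨r, ?_, Or.inr (hmem.elim (fun e => e ▸ List.mem_cons_self) (List.mem_cons_of_mem _)),
        pvGe2_trans _ hrh hhm, fun y hy => ?_⟩
      · rw [List.foldl_cons,
            show pvSelStep counts (some m) h = some h by
              simp only [pvSelStep]; rw [hb]; rfl]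
        exact hr
      · rcases List.mem_cons.mp hy with rfl | hy
        · exact hrh
        · exact hall y hy
    | false =>
      obtain ⟨r, hr, hmem, hrm, hall⟩ := ih m
      have hmh : pvGe2 (fun v => counts.getD v 0) m h := by
        simp only [Bool.or_eq_false_iff, Bool.and_eq_false_iff, decide_eq_false_iff_not,
          beq_eq_false_iff_ne, ne_eq] at hb
        obtain ⟨hb1, hb2⟩ := hb
        by_cases hlt : counts.getD h 0 < counts.getD m 0
        · exact Or.inl hlt
        · have heq : counts.getD h 0 = counts.getD m 0 := le_antisymm (not_lt.mp hb1) (not_lt.mp hlt)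
          rcases hb2 with hb2 | hb2
          · exact absurd heq hb2
          · exact Or.inr ⟨heq, not_lt.mp hb2⟩
      refine ⟨r, ?_, hmem.elim Or.inl (fun hm => Or.inr (List.mem_cons_of_mem _ hm)),
        hrm, fun y hy => ?_⟩
      · rw [List.foldl_cons,
            show pvSelStep counts (some m) h = some m by
              simp only [pvSelStep]; rw [hb]; rfl]
        exact hr
      · rcases List.mem_cons.mp hy with rfl | hy
        · exact pvGe2_trans _ hrm hmh
        · exact hall y hy

-- B returns the best candidate
theorem pv_alt_best (xs : List String) (dd : List (String × List String))
    (ad : List (String × String)) (cs : List (String × String × String)) (hne : xs ≠ []) :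
    pvBest (fun v => pvCheckDegree v dd ad cs) xs (break_tie_alt xs dd ad cs) := by
  obtain ⟨h, t, rfl⟩ := List.exists_cons_of_ne_nil hne
  obtain ⟨r, hr, hmem, hrh, hall⟩ := pv_sel_foldl
    (cs.foldl (pvCountStep ad) ((h :: t).foldl (fun d v => d.insert v 0) PySem.Dict.empty)) t h
  have hmem' : r ∈ h :: t := hmem.elim (fun e => e ▸ List.mem_cons_self) (List.mem_cons_of_mem _)
  have hres : break_tie_alt (h :: t) dd ad cs = r := by
    have hz : break_tie_alt (h :: t) dd ad cs
        = (t.foldl (pvSelStep (cs.foldl (pvCountStep ad)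
            ((h :: t).foldl (fun d v => d.insert v 0) PySem.Dict.empty))) (some h)).getD "" := rfl
    rw [hz, hr]
    rfl
  rw [hres]
  refine ⟨hmem', fun y hy => ?_⟩
  have hbase : pvGe2 (fun v => (cs.foldl (pvCountStep ad)
      ((h :: t).foldl (fun d v => d.insert v 0) PySem.Dict.empty)).getD v 0) r y := by
    rcases List.mem_cons.mp hy with rfl | hy'
    · exact hrh
    · exact hall y hy'
  unfold pvGe2 at hbase ⊢
  simp only at hbase ⊢
  rw [pv_counts_eq_checkDegree (h :: t) dd ad cs y hy,
      pv_counts_eq_checkDegree (h :: t) dd ad cs r hmem'] at hbase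
  exact hbase

-- the alphabetically-first element of the max-degree tie list is the best candidate
theorem pv_tie_best (g : String → Int) (xs K : List String) (hK : ∀ k, k ∈ K ↔ k ∈ xs) (M : Int)
    (hub : ∀ k ∈ K, g k ≤ M) (r : String)
    (hrtie : r ∈ K.filter (fun k => g k == M))
    (hmin : ∀ y ∈ K.filter (fun k => g k == M), r ≤ y) :
    pvBest g xs r := by
  have hrK := (List.mem_filter.mp hrtie).1
  have hrM : g r = M := by simpa using (List.mem_filter.mp hrtie).2
  refine ⟨(hK r).mp hrK, fun y hy => ?_⟩
  have hyK : y ∈ K := (hK y).mpr hy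
  by_cases hyM : g y = M
  · exact Or.inr ⟨hyM.trans hrM.symm, hmin y (List.mem_filter.mpr ⟨hyK, by simp [hyM]⟩)⟩
  · exact Or.inl (hrM ▸ lt_of_le_of_ne (hub y hyK) hyM)

-- A returns the best candidate
theorem pv_a_best (xs : List String) (dd : List (String × List String))
    (ad : List (String × String)) (cs : List (String × String × String)) (hne : xs ≠ []) :
    pvBest (fun v => pvCheckDegree v dd ad cs) xs (break_tie xs dd ad cs) := by
  simp only [break_tie]
  set Dg := (xs.foldl (fun d var_key => d.insert var_key (pvCheckDegree var_key dd ad cs)) PySem.Dict.empty) with hDg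
  have hkeys : Dg.keys = PySem.Set.ofList xs := by
    rw [hDg, PySem.Dict.keys_foldl_insert]
    simp [pysem]
  have hnd : Dg.keys.Nodup := PySem.Dict.nodup_keys_foldl_insert _ _ _ (by simp)
  have hK : ∀ k, k ∈ Dg.keys ↔ k ∈ xs := by
    intro k; rw [hkeys]; exact PySem.Set.mem_ofList xs k
  have hget : ∀ k ∈ xs, Dg.getD k 0 = pvCheckDegree k dd ad cs := fun k hk =>
    pv_getD_foldl_insert_fun (fun v => pvCheckDegree v dd ad cs) xs k hk
  have hvals : Dg.values = Dg.keys.map (fun k => pvCheckDegree k dd ad cs) := by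
    rw [PySem.Dict.values_eq_map_keys _ hnd 0]
    exact List.map_congr_left (fun k hk => hget k ((hK k).mp hk))
  obtain ⟨x0, hx0⟩ := List.exists_mem_of_ne_nil xs hne
  cases hmax : PySem.List.max? Dg.values (fun x => x) with
  | none =>
    rw [PySem.List.max?_eq_none_iff, hvals, List.map_eq_nil_iff] at hmax
    exact absurd ((hK x0).mpr hx0) (hmax ▸ List.not_mem_nil)
  | some M =>
    have hub : ∀ k ∈ Dg.keys, pvCheckDegree k dd ad cs ≤ M := by
      intro k hk
      have hmem : pvCheckDegree k dd ad cs ∈ Dg.values := by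
        rw [hvals]; exact List.mem_map_of_mem hk
      exact PySem.List.max?_isMax hmax _ hmem
    have hMmem : M ∈ Dg.values := PySem.List.max?_mem hmax
    obtain ⟨k0, hk0K, hk0M⟩ : ∃ k0 ∈ Dg.keys, pvCheckDegree k0 dd ad cs = M := by
      rw [hvals] at hMmem
      obtain ⟨k0, hk0, he⟩ := List.mem_map.mp hMmem
      exact ⟨k0, hk0, he⟩
    have htie : Dg.keys.foldl (fun acc var_key => if Dg.getD var_key 0 == (some M).getD 0 then acc ++ [var_key] else acc) []
        = Dg.keys.filter (fun k => pvCheckDegree k dd ad cs == M) := by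
      rw [PySem.List.foldl_congr_mem _ _
          (fun acc k => if (pvCheckDegree k dd ad cs == M) then acc ++ [k] else acc) []
          (fun acc k hk => by rw [hget k ((hK k).mp hk)]; rfl),
        PySem.List.foldl_append_if_eq_filter]
      simp
    rw [htie]
    have hk0tie : k0 ∈ Dg.keys.filter (fun k => pvCheckDegree k dd ad cs == M) :=
      List.mem_filter.mpr ⟨hk0K, by simp [hk0M]⟩
    cases hfl : Dg.keys.filter (fun k => pvCheckDegree k dd ad cs == M) with
    | nil => exact absurd (hfl ▸ hk0tie) (List.not_mem_nil)
    | cons m1 rest =>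
      cases rest with
      | nil =>
        simp only [List.length_cons, List.length_nil, Nat.zero_add]
        rw [if_pos (by rfl)]
        have hval : PySem.List.pyGetD [m1] (0 : Int) "" = m1 := rfl
        rw [hval]
        exact pv_tie_best _ xs Dg.keys hK M hub m1 (hfl ▸ List.mem_cons_self)
          (fun y hy => by rw [hfl] at hy; simp at hy; exact hy ▸ le_refl _)
      | cons m2 rest2 =>
        rw [if_neg (by simp), if_pos (by simp)]
        cases hmn : PySem.List.min? (m1 :: m2 :: rest2) (fun x => x) with
        | none => rw [PySem.List.min?_eq_none_iff] at hmn; exact absurd hmn (by simp)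
        | some m =>
          simp only [Option.getD_some]
          exact pv_tie_best _ xs Dg.keys hK M hub m (hfl ▸ PySem.List.min?_mem hmn)
            (fun y hy => PySem.List.min?_isMin hmn y (hfl ▸ hy))

-- ===== VERDICT (by name: the statement is the Claim_ definition above) =====
theorem break_tie_spec : Claim_equal_break_tie := by
  intro xs dd ad cs _ hpre
  unfold Spec_break_tie
  exact pvBest_unique (fun v => pvCheckDegree v dd ad cs) xs
    (pv_a_best xs dd ad cs hpre) (pv_alt_best xs dd ad cs hpre)
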